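-- pv_equiv track=rewrite | github.com/tjlee1214/greenhouse | Greenhouse.py | compute_anomaly_windows
-- ===== SOURCE A (Python) =====
-- def compute_anomaly_windows(anomaly_flag):
--     anomaly_windows = []
--     start_index = -1
--     end_index = -1
--     for i in range(len(anomaly_flag)):
--         if anomaly_flag[i][0] == '1':
--             if start_index==-1:
--                 start_index = i
--                 end_index = i
--             elif end_index+1 != i:
--                 anomaly_windows.append([start_index,end_index])
--                 start_index = i
--                 end_index = i
--             else:
--                 end_index = i
--
--     #Save the last anomaly window information (e.g startIndex & endIndex) into the anomaly_windows only if it has not been saved in anomaly_winows list yet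
--     if anomaly_observed(start_index) and (is_anomaly_windows_empty(anomaly_windows) or anomaly_window_already_saved(anomaly_windows, start_index)==False):
--         anomaly_windows.append([start_index, end_index])
--
--     return anomaly_windows
--
-- def anomaly_observed(start_index):
--     return start_index!=-1
--
-- def is_anomaly_windows_empty(anomaly_windows):
--     return len(anomaly_windows)==0
--
-- def anomaly_window_already_saved(anomaly_windows, start_index):
--     return anomaly_windows[len(anomaly_windows)-1][0]==start_index
-- ===== SOURCE B (Python) =====
-- def compute_anomaly_windows(anomaly_flag):
--     flagged = [s[0] == '1' for s in anomaly_flag]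
--     n = len(flagged)
--     starts = [i for i in range(n) if flagged[i] and (i == 0 or not flagged[i - 1])]
--     ends = [i for i in range(n) if flagged[i] and (i == n - 1 or not flagged[i + 1])]
--     return [[s, e] for s, e in zip(starts, ends)]
-- ===== Notes on version B (the rewrite author's own statement) =====
-- stated objective: alternative
-- what changed: Replaces A's sentinel state machine (pending start/end, gap test, after-loop flush with duplicate-save guard) by neighbor-based boundary detection: compute the flag list, collect run starts (flagged with unflagged predecessor) and run ends (flagged with unflagged successor) as two independent comprehensions and zip them into windows.
import Mathlib
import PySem

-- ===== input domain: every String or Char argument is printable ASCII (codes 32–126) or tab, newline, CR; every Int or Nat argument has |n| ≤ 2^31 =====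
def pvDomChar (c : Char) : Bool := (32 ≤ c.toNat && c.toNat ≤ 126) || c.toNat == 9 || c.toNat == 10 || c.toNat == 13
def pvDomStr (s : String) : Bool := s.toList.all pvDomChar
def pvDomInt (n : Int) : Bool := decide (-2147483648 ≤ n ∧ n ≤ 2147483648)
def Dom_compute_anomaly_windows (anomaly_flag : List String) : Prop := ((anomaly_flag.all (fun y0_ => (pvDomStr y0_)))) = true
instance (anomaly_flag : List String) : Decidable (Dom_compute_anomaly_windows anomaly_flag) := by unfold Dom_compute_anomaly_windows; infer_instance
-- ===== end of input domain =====

-- B replaces A's sentinel state machine + after-loop flush by neighbor-based boundary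
-- detection (run starts and run ends collected independently, then zipped); same values, same cost.

-- ===== PORT A =====
def anomaly_observed (start_index : Int) : Bool := start_index != -1

def is_anomaly_windows_empty (anomaly_windows : List (List Int)) : Bool := anomaly_windows.length == 0

-- anomaly_windows[len(anomaly_windows)-1][0]; only ever called with a non-empty list (short-circuit `or` in A)
def anomaly_window_already_saved (anomaly_windows : List (List Int)) (start_index : Int) : Bool :=
  (anomaly_windows.getLastD []).getD 0 0 == start_index

def compute_anomaly_windows (anomaly_flag : List String) : List (List Int) :=
  let st := (List.range anomaly_flag.length).foldl
    (fun (st : List (List Int) × Int × Int) i =>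
      let (w, s, e) := st
      if PySem.Str.pyGet? (anomaly_flag.getD i "") 0 == some '1' then
        if s == -1 then (w, (i : Int), (i : Int))
        else if e + 1 != (i : Int) then (w ++ [[s, e]], (i : Int), (i : Int))
        else (w, s, (i : Int))
      else st) ([], -1, -1)
  let (w, s, e) := st
  if anomaly_observed s && (is_anomaly_windows_empty w || (anomaly_window_already_saved w s == false))
  then w ++ [[s, e]] else w

-- ===== PORT B =====
def compute_anomaly_windows_alt (anomaly_flag : List String) : List (List Int) :=
  let flagged := anomaly_flag.map (fun s => PySem.Str.pyGet? s 0 == some '1')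
  let n := flagged.length
  let starts := (List.range n).filter
    (fun i => flagged.getD i false && (i == 0 || !(flagged.getD (i - 1) false)))
  let ends := (List.range n).filter
    (fun i => flagged.getD i false && (i == n - 1 || !(flagged.getD (i + 1) false)))
  (starts.zip ends).map (fun p => [(p.1 : Int), (p.2 : Int)])

-- ===== PRECONDITION & SPEC =====
-- Pre_ excludes lists containing an empty string: there A raises IndexError on anomaly_flag[i][0] (B raises too).
def Pre_compute_anomaly_windows (anomaly_flag : List String) : Prop :=
  ∀ s ∈ anomaly_flag, s ≠ ""
instance (anomaly_flag : List String) : Decidable (Pre_compute_anomaly_windows anomaly_flag) := by unfold Pre_compute_anomaly_windows; infer_instance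
def pvWitness_compute_anomaly_windows : List String := ["1", "0", "1", "1"]

def Spec_compute_anomaly_windows (anomaly_flag : List String) (out : List (List Int)) : Prop := out = compute_anomaly_windows_alt anomaly_flag
instance (anomaly_flag : List String) (out : List (List Int)) : Decidable (Spec_compute_anomaly_windows anomaly_flag out) := by unfold Spec_compute_anomaly_windows; infer_instance

-- ===== CLAIM (what is proved, stated in full; the proofs are below) =====
def Claim_equal_compute_anomaly_windows : Prop := ∀ (anomaly_flag : List String), Dom_compute_anomaly_windows anomaly_flag → Pre_compute_anomaly_windows anomaly_flag → Spec_compute_anomaly_windows anomaly_flag (compute_anomaly_windows anomaly_flag)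

-- ===== LEMMAS AND PROOFS =====

-- A's loop body, abstracted over the per-index flag f
def stepA (f : Nat → Bool) (st : List (List Int) × Int × Int) (i : Nat) : List (List Int) × Int × Int :=
  let (w, s, e) := st
  if f i then
    if s == -1 then (w, (i : Int), (i : Int))
    else if e + 1 != (i : Int) then (w ++ [[s, e]], (i : Int), (i : Int))
    else (w, s, (i : Int))
  else st

-- A's after-loop flush
def flushA (st : List (List Int) × Int × Int) : List (List Int) :=
  if anomaly_observed st.2.1 && (is_anomaly_windows_empty st.1 || (anomaly_window_already_saved st.1 st.2.1 == false))
  then st.1 ++ [[st.2.1, st.2.2]] else st.1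

-- reference: windows of positions [j, j+k) given a pending run (start, end) (end < j)
def restW (f : Nat → Bool) : Nat → Nat → Option (Nat × Nat) → List (List Int)
  | _, 0, none => []
  | _, 0, some (s, e) => [[(s : Int), (e : Int)]]
  | j, k+1, none => if f j then restW f (j+1) k (some (j, j)) else restW f (j+1) k none
  | j, k+1, some (s, e) =>
    if f j then
      (if e + 1 = j then restW f (j+1) k (some (s, j))
       else [(s : Int), (e : Int)] :: restW f (j+1) k (some (j, j)))
    else restW f (j+1) k (some (s, e))

def stOf : Option (Nat × Nat) → Int × Int
  | none => (-1, -1)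
  | some (s, e) => ((s : Int), (e : Int))

def pendInv (j : Nat) (w : List (List Int)) : Option (Nat × Nat) → Prop
  | none => w = []
  | some (s, e) => s ≤ e ∧ e < j ∧ (w = [] ∨ (w.getLastD []).getD 0 0 < (s : Int))

-- starts / ends of positions [j, j+k)
def startsW (f : Nat → Bool) (j k : Nat) : List Nat :=
  (List.range' j k 1).filter (fun i => f i && (i == 0 || !f (i - 1)))

def endsW (f : Nat → Bool) (j k : Nat) : List Nat :=
  (List.range' j k 1).filter (fun i => f i && !f (i + 1))

def pair2 (p : Nat × Nat) : List Int := [(p.1 : Int), (p.2 : Int)]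

-- a pending run whose end lies strictly before the next unflagged frontier flushes first
theorem restW_gap (f : Nat → Bool) (k : Nat) : ∀ (j s e : Nat),
    (e + 1 < j ∨ (e + 1 = j ∧ f j = false)) →
    restW f j k (some (s, e)) = [(s : Int), (e : Int)] :: restW f j k none := by
  induction k with
  | zero => intro j s e _; simp [restW]
  | succ k ih =>
    intro j s e h
    by_cases hf : f j
    · have hne : e + 1 ≠ j := by rcases h with h | ⟨_, h2⟩; omega; simp [hf] at h2
      simp [restW, hf, hne]
    · simp only [restW, hf, if_false, Bool.false_eq_true]
      exact ih (j+1) s e (by rcases h with h | ⟨h1, _⟩ <;> omega)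

-- A's loop, related to the reference
theorem loopA_restW (f : Nat → Bool) (k : Nat) : ∀ (j : Nat) (w : List (List Int)) (p : Option (Nat × Nat)),
    pendInv j w p →
    flushA ((List.range' j k 1).foldl (stepA f) (w, stOf p)) = w ++ restW f j k p := by
  induction k with
  | zero =>
    intro j w p hp
    match p with
    | none =>
      simp only [pendInv] at hp; subst hp
      simp [flushA, stOf, restW, anomaly_observed]
    | some (s, e) =>
      obtain ⟨_, _, hw⟩ := hp
      have hobs : anomaly_observed (s : Int) = true := by
        simp [anomaly_observed]
      rcases hw with hw | hlt
      · subst hw; simp [flushA, stOf, restW, hobs, is_anomaly_windows_empty]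
      · have : anomaly_window_already_saved w (s : Int) = false := by
          simp only [anomaly_window_already_saved, beq_eq_false_iff_ne, ne_eq]; omega
        simp [flushA, stOf, restW, hobs, is_anomaly_windows_empty, this]
  | succ k ih =>
    intro j w p hp
    rw [List.range'_succ, List.foldl_cons]
    match p with
    | none =>
      simp only [pendInv] at hp; subst hp
      by_cases hf : f j
      · have : stepA f ([], stOf none) j = ([], stOf (some (j, j))) := by
          simp [stepA, stOf, hf]
        rw [this, ih (j+1) [] (some (j, j)) (by exact ⟨le_refl _, by omega, Or.inl rfl⟩)]
        simp [restW, hf]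
      · have : stepA f ([], stOf none) j = ([], stOf none) := by simp [stepA, stOf, hf]
        rw [this, ih (j+1) [] none rfl]
        simp [restW, hf]
    | some (s, e) =>
      obtain ⟨hse, hej, hw⟩ := hp
      by_cases hf : f j
      · have hsne : ((s : Int) == -1) = false := by simp
        by_cases hcont : e + 1 = j
        · have : stepA f (w, stOf (some (s, e))) j = (w, stOf (some (s, j))) := by
            have h2 : (e : Int) + 1 = (j : Int) := by omega
            simp [stepA, stOf, hf, hsne, h2]
          rw [this, ih (j+1) w (some (s, j)) ⟨by omega, by omega, hw⟩]
          simp [restW, hf, hcont]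
        · have hgap : ¬ ((e : Int) + 1 = (j : Int)) := by omega
          have : stepA f (w, stOf (some (s, e))) j = (w ++ [[(s : Int), (e : Int)]], stOf (some (j, j))) := by
            simp [stepA, stOf, hsne, hf, hgap]
          rw [this, ih (j+1) (w ++ [[(s : Int), (e : Int)]]) (some (j, j))
            ⟨le_refl _, by omega, Or.inr (by simp; omega)⟩]
          simp [restW, hf, hcont]
      · have : stepA f (w, stOf (some (s, e))) j = (w, stOf (some (s, e))) := by
          simp [stepA, hf, stOf]
        rw [this, ih (j+1) w (some (s, e)) ⟨hse, by omega, hw⟩]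
        simp [restW, hf]

-- cons/skip unfoldings of the boundary lists
theorem startsW_cons (f : Nat → Bool) (j k : Nat) (h : (f j && (j == 0 || !f (j - 1))) = true) :
    startsW f j (k+1) = j :: startsW f (j+1) k := by
  simp [startsW, List.range'_succ, h]

theorem startsW_skip (f : Nat → Bool) (j k : Nat) (h : (f j && (j == 0 || !f (j - 1))) = false) :
    startsW f j (k+1) = startsW f (j+1) k := by
  simp [startsW, List.range'_succ, h]

theorem endsW_cons (f : Nat → Bool) (j k : Nat) (h : (f j && !f (j + 1)) = true) :
    endsW f j (k+1) = j :: endsW f (j+1) k := by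
  simp [endsW, List.range'_succ, h]

theorem endsW_skip (f : Nat → Bool) (j k : Nat) (h : (f j && !f (j + 1)) = false) :
    endsW f j (k+1) = endsW f (j+1) k := by
  simp [endsW, List.range'_succ, h]

-- B's zip of boundary lists, related to the reference (mutual fresh/pending induction)
theorem zip_restW (f : Nat → Bool) (k : Nat) :
    (∀ j : Nat, (∀ m, j + k ≤ m → f m = false) → (j = 0 ∨ f (j - 1) = false ∨ f j = false) →
      ((startsW f j k).zip (endsW f j k)).map pair2 = restW f j k none) ∧
    (∀ j a : Nat, (∀ m, j + k ≤ m → f m = false) → 1 ≤ j → f (j - 1) = true → f j = true →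
      ((a :: startsW f j k).zip (endsW f j k)).map pair2 = restW f j k (some (a, j - 1))) := by
  induction k with
  | zero =>
    constructor
    · intro j _ _; simp [startsW, endsW, restW]
    · intro j a hfn _ _ hfj
      exact absurd (hfn j (by omega)) (by simp [hfj])
  | succ k ih =>
    obtain ⟨ihP, ihQ⟩ := ih
    constructor
    · -- fresh state
      intro j hfn hP
      by_cases hf : f j
      · have hst : (f j && (j == 0 || !f (j - 1))) = true := by
          rcases hP with h | h | h
          · simp [h] at hf ⊢; simp [hf]
          · simp [hf, h]
          · simp [hf] at h
        rw [startsW_cons f j k hst]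
        by_cases hnx : f (j + 1)
        · rw [endsW_skip f j k (by simp [hnx])]
          have hQ := ihQ (j + 1) j (by intro m hm; exact hfn m (by omega)) (by omega)
            (by simpa using hf) hnx
          simp only [Nat.add_sub_cancel] at hQ
          rw [show restW f j (k+1) none = restW f (j+1) k (some (j, j)) from by
            simp [restW, hf]]
          exact hQ
        · rw [endsW_cons f j k (by simp [hf, hnx]), List.zip_cons_cons, List.map_cons]
          rw [ihP (j + 1) (by intro m hm; exact hfn m (by omega))
            (Or.inr (Or.inr (by simpa using hnx)))]
          rw [show restW f j (k+1) none = restW f (j+1) k (some (j, j)) from by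
            simp [restW, hf]]
          rw [restW_gap f k (j + 1) j j (Or.inr ⟨rfl, by simpa using hnx⟩)]
          rfl
      · rw [startsW_skip f j k (by simp [hf]), endsW_skip f j k (by simp [hf])]
        rw [ihP (j + 1) (by intro m hm; exact hfn m (by omega))
          (Or.inr (Or.inl (by simpa using hf)))]
        simp [restW, hf]
    · -- pending state: start a consumed, current position j flagged, f (j-1) flagged
      intro j a hfn hj hprev hfj
      have hst : (f j && (j == 0 || !f (j - 1))) = false := by
        simp [hprev]; omega
      rw [startsW_skip f j k hst]
      rw [show restW f j (k+1) (some (a, j - 1)) = restW f (j+1) k (some (a, j)) from by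
        simp [restW, hfj]; omega]
      by_cases hnx : f (j + 1)
      · rw [endsW_skip f j k (by simp [hnx])]
        have hQ := ihQ (j + 1) a (by intro m hm; exact hfn m (by omega)) (by omega)
          (by simpa using hfj) hnx
        simpa using hQ
      · rw [endsW_cons f j k (by simp [hfj, hnx]), List.zip_cons_cons, List.map_cons]
        rw [ihP (j + 1) (by intro m hm; exact hfn m (by omega))
          (Or.inr (Or.inr (by simpa using hnx)))]
        rw [restW_gap f k (j + 1) a j (Or.inr ⟨rfl, by simpa using hnx⟩)]
        rfl

-- ===== VERDICT (by name: the statement is the Claim_ definition above) =====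
theorem compute_anomaly_windows_spec : Claim_equal_compute_anomaly_windows := by
  intro l _ _
  unfold Spec_compute_anomaly_windows compute_anomaly_windows compute_anomaly_windows_alt
  set flags : List Bool := l.map (fun s => PySem.Str.pyGet? s 0 == some '1') with hflags
  set f : Nat → Bool := fun i => flags.getD i false with hf
  set n : Nat := l.length with hn
  have hlen : flags.length = n := by simp [hflags, hn]
  have hout : ∀ m, n ≤ m → f m = false := by
    intro m hm
    simp [hf, List.getD_eq_getElem?_getD, List.getElem?_eq_none (by omega : flags.length ≤ m)]
  -- A's loop over the raw strings is A's loop over the flag list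
  have hfold : (List.range n).foldl (fun (st : List (List Int) × Int × Int) i =>
        let (w, s, e) := st
        if PySem.Str.pyGet? (l.getD i "") 0 == some '1' then
          if s == -1 then (w, (i : Int), (i : Int))
          else if e + 1 != (i : Int) then (w ++ [[s, e]], (i : Int), (i : Int))
          else (w, s, (i : Int))
        else st) ([], -1, -1)
      = (List.range n).foldl (stepA f) ([], -1, -1) := by
    apply PySem.List.foldl_congr_mem
    intro acc x hx
    have hxn : x < n := List.mem_range.mp hx
    have hfx : (PySem.Str.pyGet? (l.getD x "") 0 == some '1') = f x := by
      simp [hf, hflags, List.getD_eq_getElem?_getD, List.getElem?_map,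
        List.getElem?_eq_getElem (by omega : x < l.length)]
    obtain ⟨w, s, e⟩ := acc
    simp only [stepA, hfx]
  have hA := loopA_restW f n 0 [] none rfl
  simp only [stOf, List.nil_append] at hA
  have hB := (zip_restW f n).1 0 (fun m hm => hout m (by omega)) (Or.inl rfl)
  have hstarts : (List.range n).filter
      (fun i => flags.getD i false && (i == 0 || !(flags.getD (i - 1) false))) = startsW f 0 n := by
    unfold startsW; rw [List.range_eq_range']
  have hends : (List.range n).filter
      (fun i => flags.getD i false && (i == n - 1 || !(flags.getD (i + 1) false))) = endsW f 0 n := by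
    unfold endsW; rw [List.range_eq_range']
    refine List.filter_congr ?_
    intro i hi
    have hin : i < n := by have := List.mem_range'_1.mp hi; omega
    by_cases hlast : i = n - 1
    · subst hlast
      have h1 : f (n - 1 + 1) = false := hout _ (by omega)
      simp only [hf, List.getD_eq_getElem?_getD] at h1
      simp [hf, List.getD_eq_getElem?_getD, h1]
    · simp [hf, (by simpa using hlast : (i == n - 1) = false)]
  show flushA ((List.range n).foldl (fun (st : List (List Int) × Int × Int) i =>
        let (w, s, e) := st
        if PySem.Str.pyGet? (l.getD i "") 0 == some '1' then
          if s == -1 then (w, (i : Int), (i : Int))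
          else if e + 1 != (i : Int) then (w ++ [[s, e]], (i : Int), (i : Int))
          else (w, s, (i : Int))
        else st) ([], -1, -1))
    = (((List.range flags.length).filter (fun i => flags.getD i false && (i == 0 || !(flags.getD (i - 1) false)))).zip
       ((List.range flags.length).filter (fun i => flags.getD i false && (i == flags.length - 1 || !(flags.getD (i + 1) false))))).map
      (fun p => [(p.1 : Int), (p.2 : Int)])
  rw [hlen, hfold, hstarts, hends, List.range_eq_range', hA]
  exact hB.symm
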